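-- pv_equiv track=rewrite | github.com/BlenderCN/Learnbgame | All_In_One/addons/import-export-clausewitz/utils.py | TransposeCoordinateArray3D
-- ===== SOURCE A (Python) =====
-- def my_range(start, end, step):
--     while start <= end:
--         yield start
--         start += step
--
-- def TransposeCoordinateArray3D(data):
--     result = []
--
--     if len(data) % 3 == 0:
--         for i in my_range(0, len(data) - 3, 3):
--             result.append((data[i], data[i + 1], data[i + 2]))
--
--         return result
--     else:
--         return result
-- ===== SOURCE B (Python) =====
-- def TransposeCoordinateArray3D(data):
--     if len(data) % 3 != 0:
--         return []
--     it = iter(data)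
--     return list(zip(it, it, it))
-- ===== Notes on version B (the rewrite author's own statement) =====
-- stated objective: idiomatic
-- what changed: Replaces the custom inclusive-range generator and per-index random access (data[i], data[i+1], data[i+2]) with the standard iterator idiom list(zip(it, it, it)) that consumes the list three elements at a time.
import Mathlib
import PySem

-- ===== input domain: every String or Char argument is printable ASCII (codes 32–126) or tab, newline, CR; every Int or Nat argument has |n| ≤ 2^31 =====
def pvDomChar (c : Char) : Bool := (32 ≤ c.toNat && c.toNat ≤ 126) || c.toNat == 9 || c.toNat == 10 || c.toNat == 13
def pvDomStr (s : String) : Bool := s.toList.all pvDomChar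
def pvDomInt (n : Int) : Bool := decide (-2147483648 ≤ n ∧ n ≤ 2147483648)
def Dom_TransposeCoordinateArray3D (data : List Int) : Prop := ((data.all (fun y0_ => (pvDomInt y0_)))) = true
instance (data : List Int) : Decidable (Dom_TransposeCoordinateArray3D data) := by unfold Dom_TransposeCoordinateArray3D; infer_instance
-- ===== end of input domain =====

-- B replaces A's custom inclusive-range generator + per-index random access by the
-- iterator idiom list(zip(it, it, it)), consuming the list three elements at a time (idiomatic).

-- ===== PORT A =====
-- my_range(start, end, step): inclusive while-loop generator. The '0 < step' conjunct is
-- only a totality guard (A always calls it with step = 3; Python would loop forever otherwise).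
def myRange (start stop step : Int) : List Int :=
  if _h : start ≤ stop ∧ 0 < step then start :: myRange (start + step) stop step else []
  termination_by (stop - start + 1).toNat
  decreasing_by omega

def TransposeCoordinateArray3D (data : List Int) : List (Int × Int × Int) :=
  if PySem.Int.mod (data.length : Int) 3 = 0 then
    (myRange 0 ((data.length : Int) - 3) 3).foldl
      (fun result i =>
        result ++ [(PySem.List.pyGetD data i 0,
                    PySem.List.pyGetD data (i + 1) 0,
                    PySem.List.pyGetD data (i + 2) 0)]) []
  else []

-- ===== PORT B =====
-- list(zip(it, it, it)) on a shared iterator: take three elements per step, stop when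
-- fewer than three remain.
def chunk3 : List Int → List (Int × Int × Int)
  | a :: b :: c :: rest => (a, b, c) :: chunk3 rest
  | _ => []

def TransposeCoordinateArray3D_alt (data : List Int) : List (Int × Int × Int) :=
  if PySem.Int.mod (data.length : Int) 3 ≠ 0 then []
  else chunk3 data

-- ===== PRECONDITION & SPEC =====
def Spec_TransposeCoordinateArray3D (data : List Int) (out : List (Int × Int × Int)) : Prop := out = TransposeCoordinateArray3D_alt data
instance (data : List Int) (out : List (Int × Int × Int)) : Decidable (Spec_TransposeCoordinateArray3D data out) := by unfold Spec_TransposeCoordinateArray3D; infer_instance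

-- ===== CLAIM (what is proved, stated in full; the proofs are below) =====
def Claim_equal_TransposeCoordinateArray3D : Prop := ∀ (data : List Int), Dom_TransposeCoordinateArray3D data → Spec_TransposeCoordinateArray3D data (TransposeCoordinateArray3D data)

-- ===== LEMMAS AND PROOFS =====

lemma myRange_nil {a b s : Int} (h : ¬ (a ≤ b ∧ 0 < s)) : myRange a b s = [] := by
  rw [myRange]; simp [h]

lemma myRange_cons {a b s : Int} (h : a ≤ b ∧ 0 < s) :
    myRange a b s = a :: myRange (a + s) b s := by
  rw [myRange]; simp [h]

lemma myRange_shift (d : Int) : ∀ a b s : Int,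
    myRange (a + d) (b + d) s = (myRange a b s).map (· + d) := by
  intro a b s
  by_cases h : a ≤ b ∧ 0 < s
  · rw [myRange_cons h, myRange_cons (by omega : a + d ≤ b + d ∧ 0 < s), List.map_cons]
    have e : a + d + s = a + s + d := by ring
    rw [e, myRange_shift d (a + s) b s]
  · rw [myRange_nil h, myRange_nil (by omega : ¬(a + d ≤ b + d ∧ 0 < s)), List.map_nil]
  termination_by a b _ => (b - a + 1).toNat
  decreasing_by omega

lemma mem_myRange_lower {a b s x : Int} (h : x ∈ myRange a b s) : a ≤ x := by
  by_cases hc : a ≤ b ∧ 0 < s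
  · rw [myRange_cons hc] at h
    rcases List.mem_cons.mp h with h | h
    · omega
    · have := mem_myRange_lower h; omega
  · rw [myRange_nil hc] at h; simp at h
  termination_by (b - a + 1).toNat
  decreasing_by omega

lemma pyGetD_cons3 (a b c d : Int) (l : List Int) (i : Int) (h0 : 0 ≤ i) :
    PySem.List.pyGetD (a :: b :: c :: l) (i + 3) d = PySem.List.pyGetD l i d := by
  rw [PySem.List.pyGetD_of_nonneg _ _ (by omega : (0:Int) ≤ i + 3),
      PySem.List.pyGetD_of_nonneg _ _ h0]
  have h : (i + 3).toNat = i.toNat + 3 := by omega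
  simp [h, List.getD]

-- A's loop body applied to `data`, as a map (via PySem.List.foldl_append_singleton).
lemma main_lemma : ∀ data : List Int, (3 : Int) ∣ (data.length : Int) →
    (myRange 0 ((data.length : Int) - 3) 3).map
      (fun i => (PySem.List.pyGetD data i 0,
                 PySem.List.pyGetD data (i + 1) 0,
                 PySem.List.pyGetD data (i + 2) 0)) = chunk3 data := by
  intro data hdvd
  match data with
  | [] =>
    rw [myRange_nil (by simp)]
    simp [chunk3]
  | [a] => simp at hdvd
  | [a, b] => simp at hdvd
  | a :: b :: c :: rest =>
    have hlen : ((a :: b :: c :: rest).length : Int) = (rest.length : Int) + 3 := by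
      simp; omega
    have hdvd' : (3 : Int) ∣ (rest.length : Int) := by
      rcases hdvd with ⟨k, hk⟩; exact ⟨k - 1, by omega⟩
    rw [hlen]
    have h0 : (0 : Int) ≤ (rest.length : Int) + 3 - 3 ∧ (0 : Int) < 3 := by omega
    rw [myRange_cons h0, List.map_cons]
    have hsh : myRange (0 + 3) ((rest.length : Int) + 3 - 3) 3
        = (myRange 0 ((rest.length : Int) - 3) 3).map (· + 3) := by
      have e : (rest.length : Int) + 3 - 3 = ((rest.length : Int) - 3) + 3 := by ring
      rw [e, myRange_shift 3 0 ((rest.length : Int) - 3) 3]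
    rw [hsh, List.map_map]
    have hbody : ∀ i ∈ myRange 0 ((rest.length : Int) - 3) 3,
        ((fun i => (PySem.List.pyGetD (a :: b :: c :: rest) i 0,
                    PySem.List.pyGetD (a :: b :: c :: rest) (i + 1) 0,
                    PySem.List.pyGetD (a :: b :: c :: rest) (i + 2) 0)) ∘ (· + 3)) i
        = (fun i => (PySem.List.pyGetD rest i 0,
                     PySem.List.pyGetD rest (i + 1) 0,
                     PySem.List.pyGetD rest (i + 2) 0)) i := by
      intro i hi
      have h0i : 0 ≤ i := mem_myRange_lower hi
      simp only [Function.comp]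
      rw [show i + 3 + 1 = (i + 1) + 3 from by ring, show i + 3 + 2 = (i + 2) + 3 from by ring,
          pyGetD_cons3 a b c 0 rest i h0i,
          pyGetD_cons3 a b c 0 rest (i + 1) (by omega),
          pyGetD_cons3 a b c 0 rest (i + 2) (by omega)]
    rw [List.map_congr_left hbody]
    have h012 : (PySem.List.pyGetD (a :: b :: c :: rest) 0 0,
                 PySem.List.pyGetD (a :: b :: c :: rest) (0 + 1) 0,
                 PySem.List.pyGetD (a :: b :: c :: rest) (0 + 2) 0) = (a, b, c) := by
      rw [PySem.List.pyGetD_of_nonneg _ _ (by omega), PySem.List.pyGetD_of_nonneg _ _ (by omega),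
          PySem.List.pyGetD_of_nonneg _ _ (by omega)]
      norm_num [List.getD, show Int.toNat 2 = 2 from rfl, show Int.toNat 1 = 1 from rfl]
    rw [h012, main_lemma rest hdvd']
    rfl
  termination_by data => data.length
  decreasing_by simp; omega

-- ===== VERDICT (by name: the statement is the Claim_ definition above) =====
theorem TransposeCoordinateArray3D_spec : Claim_equal_TransposeCoordinateArray3D := by
  intro data _
  unfold Spec_TransposeCoordinateArray3D TransposeCoordinateArray3D TransposeCoordinateArray3D_alt
  simp only [PySem.Int.mod_eq_zero_iff_dvd, ne_eq]
  by_cases h : (3 : Int) ∣ (data.length : Int)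
  · simp only [h, if_true, not_true_eq_false, if_false]
    rw [PySem.List.foldl_append_singleton_eq_map]
    simpa using main_lemma data h
  · simp [h]
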